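-- pv_equiv track=rewrite | github.com/ThomasCulham/ESC-180---Intro-to-Computer-Programming-Labs | Lab 3 questions 2-3.py | sumOfCubes
-- ===== SOURCE A (Python) =====
-- def sumOfCubes(n):
--     ans=0
--     for i in range(1, n+1):
--         x=1
--         for j in range(3):
--             x*=i
--         ans+=x
--     return ans
-- ===== SOURCE B (Python) =====
-- def sumOfCubes(n):
--     m = n if n > 0 else 0
--     return (m * (m + 1) // 2) ** 2
-- ===== Notes on version B (the rewrite author's own statement) =====
-- stated objective: faster
-- what changed: Replaced the cube-accumulating loop (with an inner multiply loop) by the closed form (n(n+1)/2)^2, treating non-positive n (empty loop) as zero.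
import Mathlib
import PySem

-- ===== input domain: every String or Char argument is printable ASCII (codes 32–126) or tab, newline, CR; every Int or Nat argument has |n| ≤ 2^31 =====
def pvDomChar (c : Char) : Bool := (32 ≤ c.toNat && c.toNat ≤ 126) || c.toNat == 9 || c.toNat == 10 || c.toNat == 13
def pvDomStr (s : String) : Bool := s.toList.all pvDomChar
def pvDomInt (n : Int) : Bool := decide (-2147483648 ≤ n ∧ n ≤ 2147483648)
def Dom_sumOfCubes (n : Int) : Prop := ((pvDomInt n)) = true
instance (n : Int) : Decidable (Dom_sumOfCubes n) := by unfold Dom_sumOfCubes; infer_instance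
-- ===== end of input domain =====

-- B changes A's O(n) loop (with an inner ×i loop of 3 steps) to the closed form (n(n+1)//2)^2, zero for non-positive n; objective: faster.

-- ===== PORT A =====
-- literal port: ans accumulates over range(1, n+1); inner range(3) loop builds x = i*i*i
def sumOfCubes (n : Int) : Int :=
  (PySem.List.pyRange 1 (n + 1) 1).foldl
    (fun ans i => ans + (PySem.List.pyRange 0 3 1).foldl (fun x _ => x * i) 1) 0

-- ===== PORT B =====
def sumOfCubes_alt (n : Int) : Int :=
  let m : Int := if n > 0 then n else 0
  (PySem.Int.floordiv (m * (m + 1)) 2) ^ 2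

-- ===== PRECONDITION & SPEC =====
def Spec_sumOfCubes (n : Int) (out : Int) : Prop := out = sumOfCubes_alt n
instance (n : Int) (out : Int) : Decidable (Spec_sumOfCubes n out) := by unfold Spec_sumOfCubes; infer_instance

-- ===== CLAIM (what is proved, stated in full; the proofs are below) =====
def Claim_equal_sumOfCubes : Prop := ∀ (n : Int), Dom_sumOfCubes n → Spec_sumOfCubes n (sumOfCubes n)

-- ===== LEMMAS AND PROOFS =====

-- triangular numbers
def pvTri : Nat → Nat
  | 0 => 0
  | m + 1 => pvTri m + (m + 1)

theorem pvTri_two (m : Nat) : 2 * pvTri m = m * (m + 1) := by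
  induction m with
  | zero => rfl
  | succ k ih => simp only [pvTri, Nat.mul_add, ih]; ring

theorem pvInner (i : Int) :
    (PySem.List.pyRange 0 3 1).foldl (fun x _ => x * i) 1 = i * i * i := by
  have h : PySem.List.pyRange 0 3 1 = [0, 1, 2] := by decide
  simp [h, List.foldl]

theorem pvCubeSum (m : Nat) :
    ((List.range m).map (fun (k : Nat) => (1 : Int) + (k : Int))).foldl
      (fun ans i => ans + (PySem.List.pyRange 0 3 1).foldl (fun x _ => x * i) 1) 0
    = ((pvTri m : Int)) ^ 2 := by
  induction m with
  | zero => simp [pvTri]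
  | succ k ih =>
      rw [List.range_succ]
      simp only [List.map_append, List.map_cons, List.map_nil, List.foldl_append,
        List.foldl_cons, List.foldl_nil, ih]
      have h2 : 2 * (pvTri k : Int) = (k : Int) * ((k : Int) + 1) := by
        exact_mod_cast pvTri_two k
      simp [pvTri, pvInner]
      push_cast
      nlinarith [h2]

-- ===== VERDICT (by name: the statement is the Claim_ definition above) =====
theorem sumOfCubes_spec : Claim_equal_sumOfCubes := by
  intro n _
  unfold Spec_sumOfCubes sumOfCubes sumOfCubes_alt
  simp only [pvInner]
  rw [PySem.List.pyRange_one 1 (n + 1)]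
  have hfd : PySem.Int.floordiv ((if n > 0 then n else 0) * ((if n > 0 then n else 0) + 1)) 2
      = ((if n > 0 then n else 0) * ((if n > 0 then n else 0) + 1)) / 2 :=
    PySem.Int.floordiv_eq_ediv_of_pos (by norm_num)
  simp only [add_sub_cancel_right]
  have hcs := pvCubeSum n.toNat
  simp only [pvInner] at hcs
  rw [hcs, hfd]
  have h2 : 2 * (pvTri n.toNat : Int) = (n.toNat : Int) * ((n.toNat : Int) + 1) := by
    exact_mod_cast pvTri_two n.toNat
  by_cases hn : n > 0
  · simp only [if_pos hn]
    have hm : (n.toNat : Int) = n := Int.toNat_of_nonneg (le_of_lt hn)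
    rw [hm] at h2
    have : n * (n + 1) / 2 = (pvTri n.toNat : Int) := by omega
    rw [this]
  · simp only [if_neg hn]
    have hm : n.toNat = 0 := by omega
    simp [hm, pvTri]
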